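-- pv_equiv track=rewrite | github.com/Demo-MCP/mcp-cross-account-pipeline | pr-context-mcp/cfn_analyzer.py | _get_service_info
-- ===== SOURCE A (Python) =====
-- from typing import Dict, List, Any, Optional
--
-- def _get_service_info(resource_type: str) -> Dict[str, str]:
--     """Get AWS service and category information"""
--     service_map = {
--         "AWS::ECS::": {"service": "ECS", "category": "Compute"},
--         "AWS::EC2::": {"service": "EC2", "category": "Compute"},
--         "AWS::Lambda::": {"service": "Lambda", "category": "Compute"},
--         "AWS::IAM::": {"service": "IAM", "category": "Security"},
--         "AWS::S3::": {"service": "S3", "category": "Storage"},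
--         "AWS::RDS::": {"service": "RDS", "category": "Database"},
--         "AWS::ElasticLoadBalancingV2::": {"service": "ALB/NLB", "category": "Networking"},
--         "AWS::ECR::": {"service": "ECR", "category": "Container Registry"},
--         "AWS::Logs::": {"service": "CloudWatch Logs", "category": "Monitoring"},
--         "AWS::SecretsManager::": {"service": "Secrets Manager", "category": "Security"}
--     }
--
--     for prefix, info in service_map.items():
--         if resource_type.startswith(prefix):
--             return info
--
--     return {"service": "Unknown", "category": "Other"}
-- ===== SOURCE B (Python) =====
-- # Parse-and-dispatch: split once on '::', guard the vendor token, then a dict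
-- # keyed by the service token yields (service, category); the result dict is
-- # assembled at the end from the pair.
-- _SERVICES = [
--     ("ECS", "ECS", "Compute"),
--     ("EC2", "EC2", "Compute"),
--     ("Lambda", "Lambda", "Compute"),
--     ("IAM", "IAM", "Security"),
--     ("S3", "S3", "Storage"),
--     ("RDS", "RDS", "Database"),
--     ("ElasticLoadBalancingV2", "ALB/NLB", "Networking"),
--     ("ECR", "ECR", "Container Registry"),
--     ("Logs", "CloudWatch Logs", "Monitoring"),
--     ("SecretsManager", "Secrets Manager", "Security"),
-- ]
-- _BY_TOKEN = {tok: (svc, cat) for tok, svc, cat in _SERVICES}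
--
-- def _get_service_info(resource_type: str):
--     """Get AWS service and category information"""
--     parts = resource_type.split("::")
--     svc, cat = ("Unknown", "Other")
--     if len(parts) >= 3 and parts[0] == "AWS":
--         svc, cat = _BY_TOKEN.get(parts[1], ("Unknown", "Other"))
--     return {"service": svc, "category": cat}
-- ===== Notes on version B (the rewrite author's own statement) =====
-- stated objective: idiomatic
-- what changed: B parses resource_type once by splitting on '::', guards on at least three components with the first equal to 'AWS', looks the service token up in a dict of (service, category) pairs, and assembles the result dict from that pair at the end, replacing A's linear scan of ten startswith prefix tests over fully-built result dicts.
import Mathlib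
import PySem

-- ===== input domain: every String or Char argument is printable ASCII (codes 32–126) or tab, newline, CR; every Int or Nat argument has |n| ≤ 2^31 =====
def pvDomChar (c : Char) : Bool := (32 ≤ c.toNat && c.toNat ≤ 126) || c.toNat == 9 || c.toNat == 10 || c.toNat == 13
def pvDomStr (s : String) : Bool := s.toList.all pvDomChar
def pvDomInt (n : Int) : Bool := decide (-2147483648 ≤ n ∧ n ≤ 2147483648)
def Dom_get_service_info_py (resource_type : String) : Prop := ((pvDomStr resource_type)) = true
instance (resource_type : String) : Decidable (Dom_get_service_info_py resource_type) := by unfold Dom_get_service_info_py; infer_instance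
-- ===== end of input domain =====

-- B replaces A's linear startswith scan over ten fully-built result dicts by one split on
-- '::', a guard on the vendor token, a dict lookup of a (service, category) pair keyed by
-- the service token, and assembly of the result dict at the end (idiomatic).

-- ===== PORT A =====
-- A's dict literal, as an insertion-ordered association list of (prefix, info) pairs
def pvServiceMapA : List (String × List (String × String)) :=
  [ ("AWS::ECS::", [("service", "ECS"), ("category", "Compute")]),
    ("AWS::EC2::", [("service", "EC2"), ("category", "Compute")]),
    ("AWS::Lambda::", [("service", "Lambda"), ("category", "Compute")]),
    ("AWS::IAM::", [("service", "IAM"), ("category", "Security")]),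
    ("AWS::S3::", [("service", "S3"), ("category", "Storage")]),
    ("AWS::RDS::", [("service", "RDS"), ("category", "Database")]),
    ("AWS::ElasticLoadBalancingV2::", [("service", "ALB/NLB"), ("category", "Networking")]),
    ("AWS::ECR::", [("service", "ECR"), ("category", "Container Registry")]),
    ("AWS::Logs::", [("service", "CloudWatch Logs"), ("category", "Monitoring")]),
    ("AWS::SecretsManager::", [("service", "Secrets Manager"), ("category", "Security")]) ]

-- the 'for prefix, info in service_map.items(): if resource_type.startswith(prefix): return info' loop
def pvScanA (resource_type : String) : List (String × List (String × String)) → List (String × String)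
  | [] => [("service", "Unknown"), ("category", "Other")]
  | (pfx, info) :: rest =>
      if PySem.Str.startswith resource_type pfx then info else pvScanA resource_type rest

def get_service_info_py (resource_type : String) : List (String × String) :=
  pvScanA resource_type pvServiceMapA

-- ===== PORT B =====
-- B's table of (token, service, category) triples
def pvServices : List (List Char × String × String) :=
  [ ("ECS".toList, "ECS", "Compute"),
    ("EC2".toList, "EC2", "Compute"),
    ("Lambda".toList, "Lambda", "Compute"),
    ("IAM".toList, "IAM", "Security"),
    ("S3".toList, "S3", "Storage"),
    ("RDS".toList, "RDS", "Database"),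
    ("ElasticLoadBalancingV2".toList, "ALB/NLB", "Networking"),
    ("ECR".toList, "ECR", "Container Registry"),
    ("Logs".toList, "CloudWatch Logs", "Monitoring"),
    ("SecretsManager".toList, "Secrets Manager", "Security") ]

-- _BY_TOKEN = {tok: (svc, cat) for tok, svc, cat in _SERVICES}
def pvByToken : PySem.Dict (List Char) (String × String) :=
  PySem.Dict.ofList (pvServices.map (fun t => (t.1, t.2)))

-- parts = resource_type.split("::"); svc, cat = ('Unknown','Other');
-- if len(parts) >= 3 and parts[0] == 'AWS': svc, cat = _BY_TOKEN.get(parts[1], ('Unknown','Other'));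
-- return {'service': svc, 'category': cat}
def get_service_info_py_alt (resource_type : String) : List (String × String) :=
  let parts := PySem.Chars.splitOn resource_type.toList ("::").toList
  let sc : String × String :=
    if 3 ≤ parts.length ∧ parts.getD 0 [] = "AWS".toList then
      PySem.Dict.getD pvByToken (parts.getD 1 []) ("Unknown", "Other")
    else ("Unknown", "Other")
  [("service", sc.1), ("category", sc.2)]

-- ===== PRECONDITION & SPEC =====
def Spec_get_service_info_py (resource_type : String) (out : List (String × String)) : Prop := out = get_service_info_py_alt resource_type
instance (resource_type : String) (out : List (String × String)) : Decidable (Spec_get_service_info_py resource_type out) := by unfold Spec_get_service_info_py; infer_instance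

-- ===== CLAIM (what is proved, stated in full; the proofs are below) =====
def Claim_equal_get_service_info_py : Prop := ∀ (resource_type : String), Dom_get_service_info_py resource_type → Spec_get_service_info_py resource_type (get_service_info_py resource_type)

-- ===== LEMMAS AND PROOFS =====

-- reference splitter on '::' (proof-side model of str.split('::'))
def pvSp : List Char → List (List Char)
  | [] => [[]]
  | ':' :: ':' :: r => [] :: pvSp r
  | c :: r =>
      match pvSp r with
      | [] => [[c]]
      | p :: ps => (c :: p) :: ps


theorem pvSp_ne_nil (l : List Char) : pvSp l ≠ [] := by
  rw [pvSp.eq_def]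
  split
  · simp
  · simp
  · split <;> simp

theorem pvSp_cons_of_ne {c : Char} (h : c ≠ ':') (r : List Char) :
    pvSp (c :: r) = (c :: (pvSp r).headI) :: (pvSp r).tail := by
  rw [pvSp.eq_def]
  split
  · rename_i heq; exact absurd heq (by simp)
  · rename_i r1 heq
    rw [List.cons_eq_cons] at heq
    exact absurd heq.1 h
  · rename_i c2 r2 hnomatch heq
    rw [List.cons_eq_cons] at heq
    obtain ⟨rfl, rfl⟩ := heq
    rcases hne : pvSp r with _ | ⟨p, ps⟩
    · exact absurd hne (pvSp_ne_nil r)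
    · simp

theorem pvSp_token_append {a : List Char} (h : ':' ∉ a) (r : List Char) :
    pvSp (a ++ ':' :: ':' :: r) = a :: pvSp r := by
  induction a with
  | nil => simp [pvSp]
  | cons c a' ih =>
      have hc : c ≠ ':' := fun hc => h (hc ▸ List.mem_cons_self ..)
      have h' : ':' ∉ a' := fun hm => h (List.mem_cons_of_mem _ hm)
      rw [List.cons_append, pvSp_cons_of_ne hc, ih h']
      simp

theorem pvSp_cons_eq {c : Char} {r : List Char}
    (hnm : ∀ (r1 : List Char), c = ':' → r = ':' :: r1 → False)
    {q : List Char} {qs : List (List Char)} (hq : pvSp r = q :: qs) :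
    pvSp (c :: r) = (c :: q) :: qs := by
  rw [pvSp.eq_def]
  split
  · rename_i heq; exact absurd heq (by simp)
  · rename_i r1 heq
    rw [List.cons_eq_cons] at heq
    exact absurd trivial (fun _ => hnm r1 heq.1 heq.2)
  · rename_i c2 r2 hnm2 heq
    rw [List.cons_eq_cons] at heq
    obtain ⟨rfl, rfl⟩ := heq
    rw [hq]

theorem pvSp_decomp : ∀ {cs p : List Char} {ps : List (List Char)},
    pvSp cs = p :: ps → ps ≠ [] → ∃ r, cs = p ++ ':' :: ':' :: r ∧ pvSp r = ps := by
  intro cs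
  induction cs using pvSp.induct with
  | case1 =>
      intro p ps h hne
      simp only [pvSp] at h
      rw [List.cons_eq_cons] at h
      exact absurd h.2.symm hne
  | case2 r ih =>
      intro p ps h hne
      rw [show pvSp (':' :: ':' :: r) = [] :: pvSp r from rfl, List.cons_eq_cons] at h
      obtain ⟨rfl, rfl⟩ := h
      exact ⟨r, by simp, rfl⟩
  | case3 c r hnm hnil ih =>
      intro p ps h hne
      exact absurd hnil (pvSp_ne_nil r)
  | case4 c r hnm q qs hq ih =>
      intro p ps h hne
      rw [pvSp_cons_eq hnm hq, List.cons_eq_cons] at h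
      obtain ⟨rfl, rfl⟩ := h
      obtain ⟨r2, rfl, hr2⟩ := ih hq hne
      exact ⟨r2, by simp, hr2⟩

theorem pv_splitOn_go_eq :
    ∀ (fuel : Nat) (l cur : List Char) (acc : List (List Char)), l.length < fuel →
      PySem.Chars.splitOn.go [':', ':'] fuel l cur acc =
        acc.reverse ++ (cur.reverse ++ (pvSp l).headI) :: (pvSp l).tail := by
  intro fuel
  induction fuel with
  | zero => intro l cur acc h; omega
  | succ f ih =>
      intro l cur acc h
      rcases l with _ | ⟨c, rest⟩
      · simp [PySem.Chars.splitOn.go, pvSp]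
      · rw [PySem.Chars.splitOn.go]
        by_cases hp : [':', ':'].isPrefixOf (c :: rest) = true
        · rw [if_pos hp]
          rw [List.isPrefixOf_iff_prefix] at hp
          obtain ⟨t, ht⟩ := hp
          rw [← ht]
          have hlt : t.length < f := by
            have := congrArg List.length ht
            simp at this
            simp at h
            omega
          rw [show List.drop [':',':'].length ([':', ':'] ++ t) = t by simp]
          rw [ih t [] (cur.reverse :: acc) hlt]
          have : pvSp ([':', ':'] ++ t) = [] :: pvSp t := rfl
          rw [this]
          rcases hsp : pvSp t with _ | ⟨p, ps⟩
          · exact absurd hsp (pvSp_ne_nil t)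
          · simp
        · rw [if_neg hp]
          have hlt : rest.length < f := by simp at h; omega
          rw [ih rest (c :: cur) acc hlt]
          rcases hsp : pvSp rest with _ | ⟨p, ps⟩
          · exact absurd hsp (pvSp_ne_nil rest)
          · have hnm : ∀ (r1 : List Char), c = ':' → rest = ':' :: r1 → False := by
              intro r1 hc hr
              apply hp
              rw [hc, hr, List.isPrefixOf_iff_prefix]
              exact ⟨r1, rfl⟩
            rw [pvSp_cons_eq hnm hsp]
            simp

theorem pv_splitOn_eq_pvSp (l : List Char) :
    PySem.Chars.splitOn l [':', ':'] = pvSp l := by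
  rw [PySem.Chars.splitOn, pv_splitOn_go_eq (l.length + 1) l [] [] (by omega)]
  rcases hsp : pvSp l with _ | ⟨p, ps⟩
  · exact absurd hsp (pvSp_ne_nil l)
  · simp

def pvPfx (t : List Char) : List Char := "AWS".toList ++ ':' :: ':' :: (t ++ [':', ':'])

theorem pv_cond_iff (cs t : List Char) (ht : ':' ∉ t) :
    (3 ≤ (pvSp cs).length ∧ (pvSp cs).getD 0 [] = "AWS".toList ∧ (pvSp cs).getD 1 [] = t)
    ↔ pvPfx t <+: cs := by
  constructor
  · rintro ⟨h3, h0, h1⟩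
    rcases hsp : pvSp cs with _ | ⟨p0, _ | ⟨p1, ps⟩⟩
    · exact absurd hsp (pvSp_ne_nil cs)
    · rw [hsp] at h3; simp at h3
    · rw [hsp] at h3 h0 h1
      simp at h3 h0 h1
      subst h0 h1
      have hne : ps ≠ [] := by
        intro hps; rw [hps] at h3; simp at h3
      obtain ⟨r1, rfl, hr1⟩ := pvSp_decomp hsp (by simp)
      obtain ⟨r2, rfl, hr2⟩ := pvSp_decomp hr1 hne
      refine ⟨r2, ?_⟩
      simp [pvPfx]
  · rintro ⟨r, rfl⟩
    have hA : ':' ∉ "AWS".toList := by decide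
    have hshape : pvPfx t ++ r = "AWS".toList ++ ':' :: ':' :: (t ++ ':' :: ':' :: r) := by
      simp [pvPfx]
    rw [hshape, pvSp_token_append hA, pvSp_token_append ht]
    rcases hsp : pvSp r with _ | ⟨p, ps⟩
    · exact absurd hsp (pvSp_ne_nil r)
    · simp


theorem pvB_of_prefix (s : String) (t : List Char) (ht : ':' ∉ t)
    (h : pvPfx t <+: s.toList) :
    get_service_info_py_alt s =
      [("service", (PySem.Dict.getD pvByToken t ("Unknown", "Other")).1),
       ("category", (PySem.Dict.getD pvByToken t ("Unknown", "Other")).2)] := by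
  obtain ⟨h3, h0, h1⟩ := (pv_cond_iff s.toList t ht).mpr h
  unfold get_service_info_py_alt
  rw [show ("::").toList = [':', ':'] from rfl, pv_splitOn_eq_pvSp]
  simp only
  rw [if_pos ⟨h3, h0⟩, h1]

theorem pvB_unknown (s : String)
    (h : ∀ t ∈ pvByToken.keys, ¬ (pvPfx t <+: s.toList)) :
    get_service_info_py_alt s = [("service", "Unknown"), ("category", "Other")] := by
  unfold get_service_info_py_alt
  rw [show ("::").toList = [':', ':'] from rfl, pv_splitOn_eq_pvSp]
  simp only
  by_cases hcond : 3 ≤ (pvSp s.toList).length ∧ (pvSp s.toList).getD 0 [] = "AWS".toList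
  · rw [if_pos hcond]
    by_cases hc : pvByToken.contains ((pvSp s.toList).getD 1 []) = true
    · exfalso
      rw [PySem.Dict.contains_iff_mem_keys] at hc
      have hknc : ':' ∉ (pvSp s.toList).getD 1 [] := by
        have hkk := hc
        rw [show pvByToken.keys = ["ECS".toList, "EC2".toList, "Lambda".toList, "IAM".toList, "S3".toList, "RDS".toList, "ElasticLoadBalancingV2".toList, "ECR".toList, "Logs".toList, "SecretsManager".toList] by decide] at hkk
        simp only [List.mem_cons, List.not_mem_nil, or_false] at hkk
        rcases hkk with h | h | h | h | h | h | h | h | h | h <;> rw [h] <;> decide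
      exact h _ hc ((pv_cond_iff s.toList _ hknc).mp ⟨hcond.1, hcond.2, rfl⟩)
    · rw [Bool.not_eq_true] at hc
      rw [PySem.Dict.getD_of_not_contains _ _ hc]
  · rw [if_neg hcond]

theorem pv_main (s : String) : get_service_info_py s = get_service_info_py_alt s := by
  by_cases h1 : PySem.Chars.startswith s.toList ['A', 'W', 'S', ':', ':', 'E', 'C', 'S', ':', ':'] = true
  · rw [pvB_of_prefix s "ECS".toList (by decide) (by
      rw [PySem.Chars.startswith_iff] at h1
      exact (show ['A', 'W', 'S', ':', ':', 'E', 'C', 'S', ':', ':'] = pvPfx "ECS".toList by decide) ▸ h1)]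
    simp [get_service_info_py, pvServiceMapA, pvScanA, h1]
    decide
  by_cases h2 : PySem.Chars.startswith s.toList ['A', 'W', 'S', ':', ':', 'E', 'C', '2', ':', ':'] = true
  · rw [pvB_of_prefix s "EC2".toList (by decide) (by
      rw [PySem.Chars.startswith_iff] at h2
      exact (show ['A', 'W', 'S', ':', ':', 'E', 'C', '2', ':', ':'] = pvPfx "EC2".toList by decide) ▸ h2)]
    simp [get_service_info_py, pvServiceMapA, pvScanA, h1, h2]
    decide
  by_cases h3 : PySem.Chars.startswith s.toList ['A', 'W', 'S', ':', ':', 'L', 'a', 'm', 'b', 'd', 'a', ':', ':'] = true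
  · rw [pvB_of_prefix s "Lambda".toList (by decide) (by
      rw [PySem.Chars.startswith_iff] at h3
      exact (show ['A', 'W', 'S', ':', ':', 'L', 'a', 'm', 'b', 'd', 'a', ':', ':'] = pvPfx "Lambda".toList by decide) ▸ h3)]
    simp [get_service_info_py, pvServiceMapA, pvScanA, h1, h2, h3]
    decide
  by_cases h4 : PySem.Chars.startswith s.toList ['A', 'W', 'S', ':', ':', 'I', 'A', 'M', ':', ':'] = true
  · rw [pvB_of_prefix s "IAM".toList (by decide) (by
      rw [PySem.Chars.startswith_iff] at h4
      exact (show ['A', 'W', 'S', ':', ':', 'I', 'A', 'M', ':', ':'] = pvPfx "IAM".toList by decide) ▸ h4)]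
    simp [get_service_info_py, pvServiceMapA, pvScanA, h1, h2, h3, h4]
    decide
  by_cases h5 : PySem.Chars.startswith s.toList ['A', 'W', 'S', ':', ':', 'S', '3', ':', ':'] = true
  · rw [pvB_of_prefix s "S3".toList (by decide) (by
      rw [PySem.Chars.startswith_iff] at h5
      exact (show ['A', 'W', 'S', ':', ':', 'S', '3', ':', ':'] = pvPfx "S3".toList by decide) ▸ h5)]
    simp [get_service_info_py, pvServiceMapA, pvScanA, h1, h2, h3, h4, h5]
    decide
  by_cases h6 : PySem.Chars.startswith s.toList ['A', 'W', 'S', ':', ':', 'R', 'D', 'S', ':', ':'] = true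
  · rw [pvB_of_prefix s "RDS".toList (by decide) (by
      rw [PySem.Chars.startswith_iff] at h6
      exact (show ['A', 'W', 'S', ':', ':', 'R', 'D', 'S', ':', ':'] = pvPfx "RDS".toList by decide) ▸ h6)]
    simp [get_service_info_py, pvServiceMapA, pvScanA, h1, h2, h3, h4, h5, h6]
    decide
  by_cases h7 : PySem.Chars.startswith s.toList ['A', 'W', 'S', ':', ':', 'E', 'l', 'a', 's', 't', 'i', 'c', 'L', 'o', 'a', 'd', 'B', 'a', 'l', 'a', 'n', 'c', 'i', 'n', 'g', 'V', '2', ':', ':'] = true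
  · rw [pvB_of_prefix s "ElasticLoadBalancingV2".toList (by decide) (by
      rw [PySem.Chars.startswith_iff] at h7
      exact (show ['A', 'W', 'S', ':', ':', 'E', 'l', 'a', 's', 't', 'i', 'c', 'L', 'o', 'a', 'd', 'B', 'a', 'l', 'a', 'n', 'c', 'i', 'n', 'g', 'V', '2', ':', ':'] = pvPfx "ElasticLoadBalancingV2".toList by decide) ▸ h7)]
    simp [get_service_info_py, pvServiceMapA, pvScanA, h1, h2, h3, h4, h5, h6, h7]
    decide
  by_cases h8 : PySem.Chars.startswith s.toList ['A', 'W', 'S', ':', ':', 'E', 'C', 'R', ':', ':'] = true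
  · rw [pvB_of_prefix s "ECR".toList (by decide) (by
      rw [PySem.Chars.startswith_iff] at h8
      exact (show ['A', 'W', 'S', ':', ':', 'E', 'C', 'R', ':', ':'] = pvPfx "ECR".toList by decide) ▸ h8)]
    simp [get_service_info_py, pvServiceMapA, pvScanA, h1, h2, h3, h4, h5, h6, h7, h8]
    decide
  by_cases h9 : PySem.Chars.startswith s.toList ['A', 'W', 'S', ':', ':', 'L', 'o', 'g', 's', ':', ':'] = true
  · rw [pvB_of_prefix s "Logs".toList (by decide) (by
      rw [PySem.Chars.startswith_iff] at h9
      exact (show ['A', 'W', 'S', ':', ':', 'L', 'o', 'g', 's', ':', ':'] = pvPfx "Logs".toList by decide) ▸ h9)]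
    simp [get_service_info_py, pvServiceMapA, pvScanA, h1, h2, h3, h4, h5, h6, h7, h8, h9]
    decide
  by_cases h10 : PySem.Chars.startswith s.toList ['A', 'W', 'S', ':', ':', 'S', 'e', 'c', 'r', 'e', 't', 's', 'M', 'a', 'n', 'a', 'g', 'e', 'r', ':', ':'] = true
  · rw [pvB_of_prefix s "SecretsManager".toList (by decide) (by
      rw [PySem.Chars.startswith_iff] at h10
      exact (show ['A', 'W', 'S', ':', ':', 'S', 'e', 'c', 'r', 'e', 't', 's', 'M', 'a', 'n', 'a', 'g', 'e', 'r', ':', ':'] = pvPfx "SecretsManager".toList by decide) ▸ h10)]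
    simp [get_service_info_py, pvServiceMapA, pvScanA, h1, h2, h3, h4, h5, h6, h7, h8, h9, h10]
    decide
  · have hallp : ∀ t ∈ pvByToken.keys, ¬ (pvPfx t <+: s.toList) := by
      intro t htk
      rw [show pvByToken.keys = ["ECS".toList, "EC2".toList, "Lambda".toList, "IAM".toList, "S3".toList, "RDS".toList, "ElasticLoadBalancingV2".toList, "ECR".toList, "Logs".toList, "SecretsManager".toList] by decide] at htk
      simp only [List.mem_cons, List.not_mem_nil, or_false] at htk
      rcases htk with rfl | rfl | rfl | rfl | rfl | rfl | rfl | rfl | rfl | rfl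
      · intro hpre
        exact h1 (by
          rw [PySem.Chars.startswith_iff]
          exact (show pvPfx "ECS".toList = ['A', 'W', 'S', ':', ':', 'E', 'C', 'S', ':', ':'] by decide) ▸ hpre)
      · intro hpre
        exact h2 (by
          rw [PySem.Chars.startswith_iff]
          exact (show pvPfx "EC2".toList = ['A', 'W', 'S', ':', ':', 'E', 'C', '2', ':', ':'] by decide) ▸ hpre)
      · intro hpre
        exact h3 (by
          rw [PySem.Chars.startswith_iff]
          exact (show pvPfx "Lambda".toList = ['A', 'W', 'S', ':', ':', 'L', 'a', 'm', 'b', 'd', 'a', ':', ':'] by decide) ▸ hpre)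
      · intro hpre
        exact h4 (by
          rw [PySem.Chars.startswith_iff]
          exact (show pvPfx "IAM".toList = ['A', 'W', 'S', ':', ':', 'I', 'A', 'M', ':', ':'] by decide) ▸ hpre)
      · intro hpre
        exact h5 (by
          rw [PySem.Chars.startswith_iff]
          exact (show pvPfx "S3".toList = ['A', 'W', 'S', ':', ':', 'S', '3', ':', ':'] by decide) ▸ hpre)
      · intro hpre
        exact h6 (by
          rw [PySem.Chars.startswith_iff]
          exact (show pvPfx "RDS".toList = ['A', 'W', 'S', ':', ':', 'R', 'D', 'S', ':', ':'] by decide) ▸ hpre)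
      · intro hpre
        exact h7 (by
          rw [PySem.Chars.startswith_iff]
          exact (show pvPfx "ElasticLoadBalancingV2".toList = ['A', 'W', 'S', ':', ':', 'E', 'l', 'a', 's', 't', 'i', 'c', 'L', 'o', 'a', 'd', 'B', 'a', 'l', 'a', 'n', 'c', 'i', 'n', 'g', 'V', '2', ':', ':'] by decide) ▸ hpre)
      · intro hpre
        exact h8 (by
          rw [PySem.Chars.startswith_iff]
          exact (show pvPfx "ECR".toList = ['A', 'W', 'S', ':', ':', 'E', 'C', 'R', ':', ':'] by decide) ▸ hpre)
      · intro hpre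
        exact h9 (by
          rw [PySem.Chars.startswith_iff]
          exact (show pvPfx "Logs".toList = ['A', 'W', 'S', ':', ':', 'L', 'o', 'g', 's', ':', ':'] by decide) ▸ hpre)
      · intro hpre
        exact h10 (by
          rw [PySem.Chars.startswith_iff]
          exact (show pvPfx "SecretsManager".toList = ['A', 'W', 'S', ':', ':', 'S', 'e', 'c', 'r', 'e', 't', 's', 'M', 'a', 'n', 'a', 'g', 'e', 'r', ':', ':'] by decide) ▸ hpre)
    rw [pvB_unknown s hallp]
    simp [get_service_info_py, pvServiceMapA, pvScanA, h1, h2, h3, h4, h5, h6, h7, h8, h9, h10]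
-- ===== VERDICT (by name: the statement is the Claim_ definition above) =====
theorem get_service_info_py_spec : Claim_equal_get_service_info_py := by
  intro s _
  unfold Spec_get_service_info_py
  exact pv_main s
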